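-- pv_equiv track=rewrite | github.com/matheusbon/Listas-P1 | (Lista4)_Funções_e_Escopo_de_Variável/A caminho de Shichikokuyama.py | separador__silabas
-- ===== SOURCE A (Python) =====
-- def separador__silabas(string):
--     vogais = set('aeiou')
--     inicio = 0
--     resposta = []
--     for index in range(len(string)):
--         if string[index] in vogais:
--             resposta.append(string[inicio:index + 1])
--             inicio = index + 1
--     return resposta
-- ===== SOURCE B (Python) =====
-- import re
--
-- def separador__silabas(string):
--     return re.findall(r'[^aeiou]*[aeiou]', string)
-- ===== Notes on version B (the rewrite author's own statement) =====
-- stated objective: idiomatic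
-- what changed: Replaces the index loop with slice bookkeeping by a single regex findall whose pattern [^aeiou]*[aeiou] yields each syllable directly (greedy non-vowel run plus one vowel); trailing consonants match nothing and are dropped, as in A.
import Mathlib
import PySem

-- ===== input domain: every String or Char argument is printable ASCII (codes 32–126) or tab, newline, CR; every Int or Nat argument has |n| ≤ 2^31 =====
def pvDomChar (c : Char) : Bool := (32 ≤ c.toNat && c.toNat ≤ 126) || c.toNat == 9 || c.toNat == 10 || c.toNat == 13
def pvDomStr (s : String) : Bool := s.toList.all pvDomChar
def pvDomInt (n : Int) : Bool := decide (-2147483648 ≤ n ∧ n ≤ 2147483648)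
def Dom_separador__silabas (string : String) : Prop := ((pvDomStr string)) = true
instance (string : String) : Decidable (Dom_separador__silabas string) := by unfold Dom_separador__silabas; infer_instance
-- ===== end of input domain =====

-- B replaces A's index loop by re.findall(r'[^aeiou]*[aeiou]'): each syllable is a maximal
-- non-vowel run followed by one vowel; trailing consonants are dropped. Same values, idiomatic.

-- ===== PORT A =====
-- vogais = set('aeiou')
def pvVogais : List Char := PySem.Set.ofList ['a', 'e', 'i', 'o', 'u']

def separador__silabas (string : String) : List String :=
  let cs := string.toList
  let st :=
    (PySem.List.pyRange 0 (cs.length : Int) 1).foldl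
      (fun (st : Int × List String) (index : Int) =>
        if PySem.List.pyGetD cs index ' ' ∈ pvVogais then
          (index + 1, st.2 ++ [String.ofList (PySem.List.slice cs (some st.1) (some (index + 1)))])
        else st)
      (0, [])
  st.2

-- ===== PORT B =====
-- Hand port of re.findall(r'[^aeiou]*[aeiou]', s): repeated leftmost greedy matching of the
-- pattern = take the maximal run of non-vowels, then one vowel, emit it, continue after it;
-- where no vowel remains the pattern no longer matches and matching stops. Exact.
def pvIsVowel (c : Char) : Bool := c ∈ (['a', 'e', 'i', 'o', 'u'] : List Char)

def pvFindAll (cs : List Char) : List String :=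
  match h : cs.dropWhile (fun c => !pvIsVowel c) with
  | [] => []
  | v :: t =>
      String.ofList (cs.takeWhile (fun c => !pvIsVowel c) ++ [v]) :: pvFindAll t
termination_by cs.length
decreasing_by
  have h1 : (cs.dropWhile (fun c => !pvIsVowel c)).length ≤ cs.length :=
    List.length_dropWhile_le _ _
  rw [h] at h1
  simp at h1
  omega

def separador__silabas_alt (string : String) : List String :=
  pvFindAll string.toList

-- ===== PRECONDITION & SPEC =====
def Spec_separador__silabas (string : String) (out : List String) : Prop := out = separador__silabas_alt string
instance (string : String) (out : List String) : Decidable (Spec_separador__silabas string out) := by unfold Spec_separador__silabas; infer_instance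

-- ===== CLAIM (what is proved, stated in full; the proofs are below) =====
def Claim_equal_separador__silabas : Prop := ∀ (string : String), Dom_separador__silabas string → Spec_separador__silabas string (separador__silabas string)

-- ===== LEMMAS AND PROOFS =====

lemma pvMem_vogais_iff (c : Char) : c ∈ pvVogais ↔ pvIsVowel c = true := by
  simp [pvVogais, pvIsVowel, PySem.Set.mem_ofList]

lemma pvFindAll_eq (cs : List Char) :
    pvFindAll cs =
      match cs.dropWhile (fun c => !pvIsVowel c) with
      | [] => []
      | v :: t => String.ofList (cs.takeWhile (fun c => !pvIsVowel c) ++ [v]) :: pvFindAll t := by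
  rw [pvFindAll]
  split <;> rename_i h <;> simp only [h]

lemma pvTakeDrop_split {α : Type} (p : α → Bool) (l1 : List α) (x : α) (l2 : List α)
    (h1 : ∀ a ∈ l1, p a = true) (hx : p x = false) :
    (l1 ++ x :: l2).takeWhile p = l1 ∧ (l1 ++ x :: l2).dropWhile p = x :: l2 := by
  induction l1 with
  | nil => simp [List.dropWhile, hx]
  | cons a t ih =>
      have ha : p a = true := h1 a (by simp)
      have := ih (fun b hb => h1 b (by simp [hb]))
      simp [List.dropWhile, ha, this.1, this.2]

lemma pvFindAll_nil_of_all (cs : List Char)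
    (h : ∀ a ∈ cs, pvIsVowel a = false) : pvFindAll cs = [] := by
  rw [pvFindAll_eq]
  have : cs.dropWhile (fun c => !pvIsVowel c) = [] := by
    rw [List.dropWhile_eq_nil_iff]
    intro x hx; simp [h x hx]
  rw [this]

-- the loop invariant for A's fold: inicio ≤ k, everything in cs[inicio:k] is a non-vowel
lemma pvInv (cs : List Char) (m : Nat) : ∀ (k inicio : Nat) (acc : List String),
    inicio ≤ k → k ≤ cs.length → cs.length - k ≤ m →
    (∀ a ∈ (cs.drop inicio).take (k - inicio), pvIsVowel a = false) →
    ((PySem.List.pyRange (k : Int) (cs.length : Int) 1).foldl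
      (fun (st : Int × List String) (index : Int) =>
        if PySem.List.pyGetD cs index ' ' ∈ pvVogais then
          (index + 1, st.2 ++ [String.ofList (PySem.List.slice cs (some st.1) (some (index + 1)))])
        else st)
      ((inicio : Int), acc)).2 = acc ++ pvFindAll (cs.drop inicio) := by
  induction m with
  | zero =>
      intro k inicio acc hik hk hm hnv
      have hkeq : k = cs.length := by omega
      subst hkeq
      rw [PySem.List.pyRange_one_eq_nil (by omega)]
      simp only [List.foldl_nil]
      rw [pvFindAll_nil_of_all]
      · simp
      · intro a ha
        exact hnv a (by simpa [List.take_of_length_le, List.length_drop] using ha)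
  | succ m ih =>
      intro k inicio acc hik hk hm hnv
      by_cases hkl : k = cs.length
      · subst hkl
        rw [PySem.List.pyRange_one_eq_nil (by omega)]
        simp only [List.foldl_nil]
        rw [pvFindAll_nil_of_all]
        · simp
        · intro a ha
          exact hnv a (by simpa [List.take_of_length_le, List.length_drop] using ha)
      · have hklt : k < cs.length := lt_of_le_of_ne hk hkl
        rw [PySem.List.pyRange_one_cons (by exact_mod_cast hklt)]
        simp only [List.foldl_cons]
        have hget : PySem.List.pyGetD cs (k : Int) ' ' = cs[k] := by
          rw [PySem.List.pyGetD_natCast]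
          exact List.getD_eq_getElem cs ' ' hklt
        by_cases hv : pvIsVowel cs[k] = true
        · -- vowel at k: append slice cs[inicio:k+1], new inicio = k+1
          rw [hget]
          rw [if_pos ((pvMem_vogais_iff _).mpr hv)]
          have hcast : (k : Int) + 1 = ((k + 1 : Nat) : Int) := by push_cast; ring
          rw [hcast]
          have := ih (k + 1) (k + 1) (acc ++ [String.ofList (PySem.List.slice cs (some (inicio : Int)) (some ((k + 1 : Nat) : Int)))]) (le_refl _) (by omega) (by omega) (by simp)
          rw [this]
          -- now compute pvFindAll (cs.drop inicio)
          have hsplit : cs.drop inicio = (cs.drop inicio).take (k - inicio) ++ cs[k] :: cs.drop (k + 1) := by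
            conv_lhs => rw [← List.take_append_drop (k - inicio) (cs.drop inicio)]
            congr 1
            rw [List.drop_drop]
            have : inicio + (k - inicio) = k := by omega
            rw [this]
            exact List.drop_eq_getElem_cons hklt
          have htd := pvTakeDrop_split (fun c => !pvIsVowel c) ((cs.drop inicio).take (k - inicio)) cs[k] (cs.drop (k + 1))
            (by intro a ha; simp [hnv a ha]) (by simp [hv])
          conv_rhs => rw [hsplit, pvFindAll_eq]
          rw [htd.1, htd.2]
          have hslice : PySem.List.slice cs (some (inicio : Int)) (some ((k + 1 : Nat) : Int))
              = (cs.drop inicio).take (k - inicio) ++ [cs[k]] := by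
            rw [PySem.List.slice_natCast]
            have h1 : k + 1 - inicio = (k - inicio) + 1 := by omega
            rw [h1]
            rw [List.take_add_one]
            congr 1
            have hlen : k - inicio < (cs.drop inicio).length := by
              rw [List.length_drop]; omega
            rw [List.getElem?_drop]
            have : inicio + (k - inicio) = k := by omega
            rw [this]
            simp [List.getElem?_eq_getElem hklt]
          rw [hslice]
          simp
        · -- non-vowel at k: state unchanged, extend the non-vowel run
          rw [hget]
          rw [if_neg (by rw [pvMem_vogais_iff]; exact hv)]
          have hcast : (k : Int) + 1 = ((k + 1 : Nat) : Int) := by push_cast; ring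
          rw [hcast]
          apply ih (k + 1) inicio acc (by omega) (by omega) (by omega)
          intro a ha
          have h1 : k + 1 - inicio = (k - inicio) + 1 := by omega
          rw [h1, List.take_add_one] at ha
          rcases List.mem_append.mp ha with h | h
          · exact hnv a h
          · have hlen : k - inicio < (cs.drop inicio).length := by
              rw [List.length_drop]; omega
            rw [List.getElem?_drop] at h
            have he : inicio + (k - inicio) = k := by omega
            rw [he, List.getElem?_eq_getElem hklt] at h
            simp at h
            rw [h]
            simpa using hv

-- ===== VERDICT (by name: the statement is the Claim_ definition above) =====
theorem separador__silabas_spec : Claim_equal_separador__silabas := by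
  intro s _
  unfold Spec_separador__silabas separador__silabas separador__silabas_alt
  simp only []
  have := pvInv s.toList s.toList.length 0 0 [] (le_refl 0) (Nat.zero_le _) (by omega) (by simp)
  simpa using this
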